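-- pv_equiv track=rewrite | github.com/frostburn/hewmp | src/hewmp/rhythm.py | sequence_to_time_duration
-- ===== SOURCE A (Python) =====
-- def sequence_to_time_duration(sequence):
--     result = []
--     time = None
--     duration = 0
--     for i, b in enumerate(sequence):
--         if b:
--             if time is not None:
--                 result.append((time, duration))
--             duration = 0
--             time = i
--         duration += 1
--     result.append((time, duration))
--     return result
-- ===== SOURCE B (Python) =====
-- def sequence_to_time_duration(sequence):
--     seq = list(sequence)
--     n = len(seq)
--     onsets = [i for i, b in enumerate(seq) if b]
--     if not onsets:
--         return [(None, n)]
--     return [(t, nxt - t) for t, nxt in zip(onsets, onsets[1:] + [n])]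
-- ===== Notes on version B (the rewrite author's own statement) =====
-- stated objective: alternative
-- what changed: A's single stateful transition-flushing pass (carrying time/duration and flushing on each onset) is replaced by an index-table decomposition: materialize the sequence, collect onset indices with one comprehension, then pairwise-difference consecutive onsets (zip with the shifted list) to get durations.
import Mathlib
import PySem

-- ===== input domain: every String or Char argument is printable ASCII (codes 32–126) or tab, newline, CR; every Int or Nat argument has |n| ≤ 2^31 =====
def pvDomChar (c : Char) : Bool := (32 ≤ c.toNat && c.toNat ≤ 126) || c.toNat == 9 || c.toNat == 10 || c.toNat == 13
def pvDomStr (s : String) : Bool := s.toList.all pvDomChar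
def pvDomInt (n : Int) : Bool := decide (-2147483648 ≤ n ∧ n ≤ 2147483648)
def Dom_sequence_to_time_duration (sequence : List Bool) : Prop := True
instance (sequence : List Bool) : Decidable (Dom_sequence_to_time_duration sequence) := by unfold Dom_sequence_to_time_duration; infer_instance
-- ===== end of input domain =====

-- B replaces A's stateful transition-flushing pass by an onset-index table plus pairwise differences (alternative decomposition, same cost).

-- ===== PORT A =====
-- the for-loop of A: state (result, time, duration), index i follows enumerate
def seqLoopA : List Bool → Int → List (Option Int × Int) → Option Int → Int → List (Option Int × Int)
  | [], _, result, time, duration => result ++ [(time, duration)]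
  | b :: rest, i, result, time, duration =>
    if b then
      -- 'if time is not None: result.append((time, duration)); duration = 0; time = i', then 'duration += 1'
      let result' := match time with
        | some t => result ++ [(some t, duration)]
        | none => result
      seqLoopA rest (i + 1) result' (some i) (0 + 1)
    else
      seqLoopA rest (i + 1) result time (duration + 1)

def sequence_to_time_duration (sequence : List Bool) : List (Option Int × Int) :=
  seqLoopA sequence 0 [] none 0

-- ===== PORT B =====
def sequence_to_time_duration_alt (sequence : List Bool) : List (Option Int × Int) :=
  let seq := sequence
  let n : Int := seq.length
  let onsets : List Int := ((PySem.List.enumerate seq 0).filter (·.2)).map (·.1)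
  if onsets = [] then [(none, n)]
  else (onsets.zip (onsets.drop 1 ++ [n])).map (fun p => (some p.1, p.2 - p.1))
  -- onsets[1:] on a list is List.drop 1 (nonnegative start)

-- ===== PRECONDITION & SPEC =====
def Spec_sequence_to_time_duration (sequence : List Bool) (out : List (Option Int × Int)) : Prop := out = sequence_to_time_duration_alt sequence
instance (sequence : List Bool) (out : List (Option Int × Int)) : Decidable (Spec_sequence_to_time_duration sequence out) := by unfold Spec_sequence_to_time_duration; infer_instance

-- ===== CLAIM (what is proved, stated in full; the proofs are below) =====
def Claim_equal_sequence_to_time_duration : Prop := ∀ (sequence : List Bool), Dom_sequence_to_time_duration sequence → Spec_sequence_to_time_duration sequence (sequence_to_time_duration sequence)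

-- ===== LEMMAS AND PROOFS =====

-- the onset indices of `rest`, positions counted from i
def onsetsFrom : List Bool → Int → List Int
  | [], _ => []
  | b :: rest, i => if b then i :: onsetsFrom rest (i + 1) else onsetsFrom rest (i + 1)

-- (time, duration) pairs from a list of onsets with total length n
def pairs : List Int → Int → List (Option Int × Int)
  | [], _ => []
  | [t], n => [(some t, n - t)]
  | t :: t' :: ts, n => (some t, t' - t) :: pairs (t' :: ts) n

theorem seqLoopA_some (rest : List Bool) : ∀ (i t : Int) (res : List (Option Int × Int)),
    seqLoopA rest i res (some t) (i - t) = res ++ pairs (t :: onsetsFrom rest i) (i + rest.length) := by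
  induction rest with
  | nil => intro i t res; simp [seqLoopA, onsetsFrom, pairs]
  | cons b rest ih =>
    intro i t res
    cases b with
    | true =>
      have h1 : (0 : Int) + 1 = (i + 1) - i := by ring
      simp only [seqLoopA, h1, ih (i + 1) i]
      cases ho : onsetsFrom rest (i + 1) with
      | nil => simp [onsetsFrom, pairs, ho]; omega
      | cons u us =>
        simp [onsetsFrom, pairs, ho]
        congr 1
        omega
    | false =>
      have h1 : i - t + 1 = (i + 1) - t := by ring
      simp only [seqLoopA, h1, ih (i + 1) t]
      simp [onsetsFrom]
      congr 1
      omega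

theorem seqLoopA_none (rest : List Bool) : ∀ (i d : Int) (res : List (Option Int × Int)),
    seqLoopA rest i res none d =
      res ++ (match onsetsFrom rest i with
              | [] => [(none, d + rest.length)]
              | os => pairs os (i + rest.length)) := by
  induction rest with
  | nil => intro i d res; simp [seqLoopA, onsetsFrom]
  | cons b rest ih =>
    intro i d res
    cases b with
    | true =>
      have h1 : (0 : Int) + 1 = (i + 1) - i := by ring
      simp only [seqLoopA, h1, seqLoopA_some rest (i + 1) i]
      simp [onsetsFrom]
      congr 1
      omega
    | false =>
      simp only [seqLoopA, ih (i + 1) (d + 1)]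
      simp [onsetsFrom]
      cases ho : onsetsFrom rest (i + 1) with
      | nil => simp; omega
      | cons u us => simp; congr 1; omega

theorem enumerate_filter_map (seq : List Bool) : ∀ (s : Int),
    ((PySem.List.enumerate seq s).filter (·.2)).map (·.1) = onsetsFrom seq s := by
  induction seq with
  | nil => intro s; simp [PySem.List.enumerate_nil, onsetsFrom]
  | cons b rest ih =>
    intro s
    cases b <;> simp [PySem.List.enumerate_cons, onsetsFrom, List.filter, ih (s+1)]

theorem pairs_eq_zip (os : List Int) : ∀ (n : Int),
    (os.zip (os.drop 1 ++ [n])).map (fun p => (some p.1, p.2 - p.1)) = pairs os n := by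
  induction os with
  | nil => intro n; simp [pairs]
  | cons t ts ih =>
    intro n
    cases ts with
    | nil => simp [pairs]
    | cons t' ts' => simp only [List.drop, List.zip_cons_cons, List.map, pairs, List.cons_append] at *
                     simp [ih n]

-- ===== VERDICT (by name: the statement is the Claim_ definition above) =====
theorem sequence_to_time_duration_spec : Claim_equal_sequence_to_time_duration := by
  intro seq _
  unfold Spec_sequence_to_time_duration sequence_to_time_duration sequence_to_time_duration_alt
  simp only [enumerate_filter_map seq 0, pairs_eq_zip]
  rw [seqLoopA_none seq 0 0 []]
  cases h : onsetsFrom seq 0 with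
  | nil => simp [h]
  | cons u us => simp [h]
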